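-- pv_equiv track=rewrite | github.com/elijahbrookss/quant-trad | portal/backend/service/storage/repos/runtime_events.py | _resolved_event_name
-- ===== SOURCE A (Python) =====
-- from collections.abc import Mapping
-- from typing import Any, Dict, List, Optional, Sequence
--
-- def _resolved_event_name(rows: Sequence[Mapping[str, Any]]) -> str | None:
--     names = {
--         str(payload.get("event_name") or "").strip().upper()
--         for row in rows
--         for payload in [row.get("payload") if isinstance(row.get("payload"), Mapping) else {}]
--         if str(payload.get("event_name") or "").strip()
--     }
--     if len(names) == 1:
--         return next(iter(names))
--     return None
-- ===== SOURCE B (Python) =====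
-- from collections.abc import Mapping
-- from typing import Any, Mapping as _M, Sequence
--
--
-- def _resolved_event_name(rows):
--     resolved = None
--     for row in rows:
--         payload = row.get("payload")
--         if not isinstance(payload, Mapping):
--             payload = {}
--         name = str(payload.get("event_name") or "").strip().upper()
--         if not name:
--             continue
--         if resolved is None:
--             resolved = name
--         elif name != resolved:
--             return None
--     return resolved
-- ===== Notes on version B (the rewrite author's own statement) =====
-- stated objective: alternative
-- what changed: Replaces the set comprehension plus len==1 test by a single explicit pass that keeps one candidate name and returns None early on a second distinct name.
import Mathlib
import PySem

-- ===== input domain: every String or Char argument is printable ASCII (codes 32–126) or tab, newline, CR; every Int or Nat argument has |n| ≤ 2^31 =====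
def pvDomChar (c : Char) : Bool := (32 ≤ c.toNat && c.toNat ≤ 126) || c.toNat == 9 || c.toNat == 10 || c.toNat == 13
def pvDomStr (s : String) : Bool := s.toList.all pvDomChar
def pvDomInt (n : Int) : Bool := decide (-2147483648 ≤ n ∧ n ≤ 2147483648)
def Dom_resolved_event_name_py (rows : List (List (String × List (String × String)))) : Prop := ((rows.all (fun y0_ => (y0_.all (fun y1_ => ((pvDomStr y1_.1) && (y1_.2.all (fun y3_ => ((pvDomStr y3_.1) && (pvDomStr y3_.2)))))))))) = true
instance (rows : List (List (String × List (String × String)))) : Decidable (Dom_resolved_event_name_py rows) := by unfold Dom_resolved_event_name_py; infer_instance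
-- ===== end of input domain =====

-- B replaces A's set comprehension + cardinality test by a single pass holding one candidate name
-- with an early exit on a second distinct name (objective: alternative decomposition, same cost).


-- ===== PORT A =====
-- normalized name of one row: str(payload.get("event_name") or "").strip().upper()
-- (payload values are dicts here, so 'isinstance(…, Mapping)' only rules out a missing key → {})
def pvRowName (row : List (String × List (String × String))) : String :=
  PySem.Str.upper (PySem.Str.strip ((PySem.Dict.mk (((PySem.Dict.mk row).get? "payload").getD [])).getD "event_name" ""))

def resolved_event_name_py (rows : List (List (String × List (String × String)))) : Option String :=
  let names : PySem.Set String :=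
    rows.foldl (fun s row =>
      if PySem.Str.strip ((PySem.Dict.mk (((PySem.Dict.mk row).get? "payload").getD [])).getD "event_name" "") ≠ ""
      then PySem.Set.add s (pvRowName row) else s) PySem.Set.empty
  if PySem.Set.len names = 1 then names.head? else none

-- ===== PORT B =====
def pvAltLoop (resolved : Option String) :
    List (List (String × List (String × String))) → Option String
  | [] => resolved
  | row :: rest =>
    let payload : List (String × String) := ((PySem.Dict.mk row).get? "payload").getD []
    let name := PySem.Str.upper (PySem.Str.strip ((PySem.Dict.mk payload).getD "event_name" ""))
    if name = "" then pvAltLoop resolved rest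
    else match resolved with
      | none => pvAltLoop (some name) rest
      | some v => if name ≠ v then none else pvAltLoop resolved rest

def resolved_event_name_py_alt (rows : List (List (String × List (String × String)))) : Option String :=
  pvAltLoop none rows

-- ===== PRECONDITION & SPEC =====
def Spec_resolved_event_name_py (rows : List (List (String × List (String × String)))) (out : Option String) : Prop := out = resolved_event_name_py_alt rows
instance (rows : List (List (String × List (String × String)))) (out : Option String) : Decidable (Spec_resolved_event_name_py rows out) := by unfold Spec_resolved_event_name_py; infer_instance

-- ===== CLAIM (what is proved, stated in full; the proofs are below) =====
def Claim_equal_resolved_event_name_py : Prop := ∀ (rows : List (List (String × List (String × String)))), Dom_resolved_event_name_py rows → Spec_resolved_event_name_py rows (resolved_event_name_py rows)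

-- ===== LEMMAS AND PROOFS =====

-- the strip-test A's comprehension filters on, as one name
def pvRowStrip (row : List (String × List (String × String))) : String :=
  PySem.Str.strip ((PySem.Dict.mk (((PySem.Dict.mk row).get? "payload").getD [])).getD "event_name" "")

-- the set A accumulates, started from s
def pvASet (s : PySem.Set String) (rows : List (List (String × List (String × String)))) :
    PySem.Set String :=
  rows.foldl (fun s row =>
    if PySem.Str.strip ((PySem.Dict.mk (((PySem.Dict.mk row).get? "payload").getD [])).getD "event_name" "") ≠ ""
    then PySem.Set.add s (pvRowName row) else s) s

def pvAns (s : PySem.Set String) : Option String :=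
  if PySem.Set.len s = 1 then s.head? else none

lemma pvASet_cons (s : PySem.Set String) (r : List (String × List (String × String)))
    (rs : List (List (String × List (String × String)))) :
    pvASet s (r :: rs) = pvASet (if pvRowStrip r ≠ "" then PySem.Set.add s (pvRowName r) else s) rs := rfl

lemma pvAltLoop_cons_none (r : List (String × List (String × String)))
    (rs : List (List (String × List (String × String)))) :
    pvAltLoop none (r :: rs) =
      if pvRowName r = "" then pvAltLoop none rs else pvAltLoop (some (pvRowName r)) rs := rfl

lemma pvAltLoop_cons_some (v : String) (r : List (String × List (String × String)))
    (rs : List (List (String × List (String × String)))) :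
    pvAltLoop (some v) (r :: rs) =
      if pvRowName r = "" then pvAltLoop (some v) rs
      else if pvRowName r ≠ v then none else pvAltLoop (some v) rs := rfl

lemma pvRowName_empty_iff (row : List (String × List (String × String))) :
    pvRowName row = "" ↔ pvRowStrip row = "" := by
  unfold pvRowName pvRowStrip
  constructor
  · intro h
    have h2 : (PySem.Str.upper (PySem.Str.strip ((PySem.Dict.mk (((PySem.Dict.mk row).get? "payload").getD [])).getD "event_name" ""))).toList = [] := by
      rw [h]; rfl
    simp only [PySem.Str.toList_upper, PySem.Chars.upper, List.map_eq_nil_iff] at h2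
    exact String.toList_eq_nil_iff.mp h2
  · intro h; rw [h]; rfl

lemma pvASet_len_ge (s : PySem.Set String) (rows : List (List (String × List (String × String)))) :
    s.length ≤ (pvASet s rows).length := by
  induction rows generalizing s with
  | nil => simp [pvASet]
  | cons r rs ih =>
    rw [pvASet_cons]
    refine le_trans ?_ (ih _)
    split
    · simp [PySem.Set.add]; split <;> simp
    · exact le_refl _

lemma pvAns_big (t : PySem.Set String) (h : 2 ≤ t.length) : pvAns t = none := by
  have hlen : ¬ PySem.Set.len t = 1 := by
    simp only [PySem.Set.len]; omega
  unfold pvAns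
  rw [if_neg hlen]

lemma pvLoop_main (rows : List (List (String × List (String × String)))) :
    ∀ s : PySem.Set String,
      (s = [] → pvAltLoop none rows = pvAns (pvASet s rows)) ∧
      (∀ x, s = [x] → pvAltLoop (some x) rows = pvAns (pvASet s rows)) := by
  induction rows with
  | nil =>
    intro s
    refine ⟨?_, ?_⟩
    · rintro rfl; simp [pvAltLoop, pvASet, pvAns, PySem.Set.len]
    · rintro x rfl; simp [pvAltLoop, pvASet, pvAns, PySem.Set.len]
  | cons r rs ih =>
    intro s
    refine ⟨?_, ?_⟩
    · rintro rfl
      rw [pvAltLoop_cons_none, pvASet_cons]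
      by_cases hne : pvRowName r = ""
      · rw [if_pos hne, if_neg (by simp [(pvRowName_empty_iff r).mp hne])]
        exact (ih ([] : PySem.Set String)).1 rfl
      · rw [if_neg hne, if_pos (fun h => hne ((pvRowName_empty_iff r).mpr h))]
        have hadd : PySem.Set.add ([] : PySem.Set String) (pvRowName r) = [pvRowName r] := by
          simp [PySem.Set.add, PySem.Set.contains]
        rw [hadd]
        exact (ih ([pvRowName r] : PySem.Set String)).2 _ rfl
    · rintro x rfl
      rw [pvAltLoop_cons_some, pvASet_cons]
      by_cases hne : pvRowName r = ""
      · rw [if_pos hne, if_neg (by simp [(pvRowName_empty_iff r).mp hne])]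
        exact (ih ([x] : PySem.Set String)).2 x rfl
      · rw [if_neg hne, if_pos (fun h => hne ((pvRowName_empty_iff r).mpr h))]
        by_cases hx : pvRowName r = x
        · have hadd : PySem.Set.add ([x] : PySem.Set String) (pvRowName r) = [x] := by
            simp [PySem.Set.add, PySem.Set.contains, hx]
          rw [hadd, if_neg (by simp [hx])]
          exact (ih ([x] : PySem.Set String)).2 x rfl
        · have hadd : PySem.Set.add ([x] : PySem.Set String) (pvRowName r) = [x, pvRowName r] := by
            simp [PySem.Set.add, PySem.Set.contains, hx]
          rw [hadd, if_pos hx]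
          exact (pvAns_big _ (le_trans (by simp) (pvASet_len_ge [x, pvRowName r] rs))).symm

-- ===== VERDICT (by name: the statement is the Claim_ definition above) =====
theorem resolved_event_name_py_spec : Claim_equal_resolved_event_name_py := by
  intro rows _
  unfold Spec_resolved_event_name_py resolved_event_name_py resolved_event_name_py_alt
  exact ((pvLoop_main rows ([] : PySem.Set String)).1 rfl).symm
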